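-- pv_equiv track=rewrite | github.com/JeanMichelChien/projet_controller_spotter_v2 | scripts/rebuild_station_reference_online.py | sanitize_alias_conflicts
-- ===== SOURCE A (Python) =====
-- from collections import Counter, defaultdict
-- from typing import Dict, Iterable, List, Optional, Set, Tuple
--
-- def sanitize_alias_conflicts(aliases_by_station: Dict[str, Set[str]]) -> Dict[str, Set[str]]:
--     """Drop aliases mapping to multiple stations to prevent matcher ambiguity."""
--     owners: Dict[str, Set[str]] = defaultdict(set)
--     for station_norm, aliases in aliases_by_station.items():
--         for alias in aliases:
--             owners[alias].add(station_norm)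
--
--     conflicts = {alias for alias, stations in owners.items() if len(stations) > 1}
--     if not conflicts:
--         return aliases_by_station
--
--     cleaned: Dict[str, Set[str]] = {}
--     for station_norm, aliases in aliases_by_station.items():
--         cleaned[station_norm] = {alias for alias in aliases if alias not in conflicts}
--     return cleaned
-- ===== SOURCE B (Python) =====
-- def sanitize_alias_conflicts(aliases_by_station):
--     """Drop aliases mapping to multiple stations to prevent matcher ambiguity.
--
--     One pass over all aliases with two running sets (seen / conflicts),
--     instead of building an alias->stations inverted index and filtering it.
--     """
--     seen = set()
--     conflicts = set()
--     for aliases in aliases_by_station.values():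
--         for alias in aliases:
--             if alias in seen:
--                 conflicts.add(alias)
--             else:
--                 seen.add(alias)
--     if not conflicts:
--         return aliases_by_station
--     return {station: aliases - conflicts
--             for station, aliases in aliases_by_station.items()}
-- ===== Notes on version B (the rewrite author's own statement) =====
-- stated objective: simpler
-- what changed: Replaces the alias->set-of-stations inverted index (a defaultdict of sets plus a separate filtering pass over its items) by a single scan that keeps just two sets, seen and conflicts, then a dict comprehension of set differences; the identity-returning no-conflict early exit is preserved.
import Mathlib
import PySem

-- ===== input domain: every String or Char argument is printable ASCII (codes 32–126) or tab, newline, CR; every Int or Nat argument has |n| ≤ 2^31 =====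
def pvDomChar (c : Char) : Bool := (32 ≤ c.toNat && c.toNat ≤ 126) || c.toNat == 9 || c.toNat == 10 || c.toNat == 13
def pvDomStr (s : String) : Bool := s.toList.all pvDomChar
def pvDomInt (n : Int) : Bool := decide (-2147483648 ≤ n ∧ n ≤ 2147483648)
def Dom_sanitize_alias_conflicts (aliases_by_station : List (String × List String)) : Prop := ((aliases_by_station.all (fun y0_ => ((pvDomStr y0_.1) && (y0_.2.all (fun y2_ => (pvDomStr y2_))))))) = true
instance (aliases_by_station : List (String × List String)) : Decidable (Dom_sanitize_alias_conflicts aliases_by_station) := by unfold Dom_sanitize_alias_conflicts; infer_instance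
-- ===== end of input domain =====

-- B replaces A's alias→stations inverted index (defaultdict of sets plus a filtering pass over
-- its items) by a single scan keeping two flat sets (seen / conflicts); the identity-returning
-- no-conflict early exit is preserved.

-- ===== PORT A =====
-- owners = defaultdict(set); for station, aliases: for alias: owners[alias].add(station)
def pvOwners (aliases_by_station : List (String × List String)) : PySem.Dict String (PySem.Set String) :=
  aliases_by_station.foldl
    (fun owners p =>
      p.2.foldl (fun owners al => owners.modify al [] (fun s => PySem.Set.add s p.1)) owners)
    PySem.Dict.empty

def sanitize_alias_conflicts (aliases_by_station : List (String × List String)) : List (String × List String) :=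
  let owners := pvOwners aliases_by_station
  -- conflicts = {alias for alias, stations in owners.items() if len(stations) > 1}
  let conflicts : PySem.Set String :=
    PySem.Set.ofList ((owners.items.filter (fun q => decide (1 < q.2.length))).map (·.1))
  if conflicts.isEmpty then aliases_by_station
  else
    -- cleaned = {}; for station, aliases: cleaned[station] = {a for a in aliases if a not in conflicts}
    (aliases_by_station.foldl
      (fun cleaned p =>
        cleaned.insert p.1 (PySem.Set.ofList (p.2.filter (fun a => !conflicts.contains a))))
      PySem.Dict.empty).items

-- ===== PORT B =====
-- if alias in seen: conflicts.add(alias) else: seen.add(alias)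
def pvScanStep (sc : PySem.Set String × PySem.Set String) (a : String) :
    PySem.Set String × PySem.Set String :=
  if sc.1.contains a then (sc.1, PySem.Set.add sc.2 a) else (PySem.Set.add sc.1 a, sc.2)

def sanitize_alias_conflicts_alt (aliases_by_station : List (String × List String)) : List (String × List String) :=
  let sc := aliases_by_station.foldl (fun sc p => p.2.foldl pvScanStep sc)
      (PySem.Set.empty, PySem.Set.empty)
  if sc.2.isEmpty then aliases_by_station
  else aliases_by_station.map (fun p => (p.1, PySem.Set.diff p.2 sc.2))

-- ===== PRECONDITION & SPEC =====
-- Pre_ only requires the argument to be a well-formed encoding of A's parameter type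
-- Dict[str, Set[str]] (distinct station keys, distinct aliases inside each station's set);
-- every input the Python function can receive satisfies it.
def Pre_sanitize_alias_conflicts (aliases_by_station : List (String × List String)) : Prop :=
  (aliases_by_station.map Prod.fst).Nodup ∧ ∀ p ∈ aliases_by_station, p.2.Nodup

instance (aliases_by_station : List (String × List String)) : Decidable (Pre_sanitize_alias_conflicts aliases_by_station) := by unfold Pre_sanitize_alias_conflicts; infer_instance

def pvWitness_sanitize_alias_conflicts : (List (String × List String)) :=
  [("a", ["x", "y"]), ("b", ["x"])]

def Spec_sanitize_alias_conflicts (aliases_by_station : List (String × List String)) (out : List (String × List String)) : Prop := out = sanitize_alias_conflicts_alt aliases_by_station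
instance (aliases_by_station : List (String × List String)) (out : List (String × List String)) : Decidable (Spec_sanitize_alias_conflicts aliases_by_station out) := by unfold Spec_sanitize_alias_conflicts; infer_instance

-- ===== CLAIM (what is proved, stated in full; the proofs are below) =====
def Claim_equal_sanitize_alias_conflicts : Prop := ∀ (aliases_by_station : List (String × List String)), Dom_sanitize_alias_conflicts aliases_by_station → Pre_sanitize_alias_conflicts aliases_by_station → Spec_sanitize_alias_conflicts aliases_by_station (sanitize_alias_conflicts aliases_by_station)

-- ===== LEMMAS AND PROOFS =====

-- B's scan, state's conflicts component: an alias is a conflict iff it was already a conflict,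
-- or was already seen and occurs again, or occurs at least twice in the remaining stream.
lemma scan_snd_mem (ys : List String) (s c : PySem.Set String) (a : String) :
    a ∈ (ys.foldl pvScanStep (s, c)).2 ↔
      a ∈ c ∨ (a ∈ s ∧ a ∈ ys) ∨ 2 ≤ ys.count a := by
  induction ys generalizing s c with
  | nil => simp
  | cons x t ih =>
    simp only [List.foldl_cons, pvScanStep]
    have h1 : 2 ≤ t.count a → a ∈ t := fun h => List.count_pos_iff.mp (by omega)
    have h2 : a ∈ t → 1 ≤ t.count a := fun h => List.count_pos_iff.mpr h
    by_cases hax : a = x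
    · subst hax
      by_cases has : a ∈ s
      · have hc : s.contains a = true := by
          simpa [PySem.Set.contains, List.contains_iff_mem] using has
        rw [if_pos hc, ih]
        simp only [PySem.Set.mem_add, List.count_cons_self, List.mem_cons, true_or,
          and_true, has, true_and]
        constructor
        · rintro ((h | h) | h | h) <;> tauto
        · rintro (h | h | h) <;> tauto
      · have hc : s.contains a = false := by
          simp [PySem.Set.contains, List.contains_iff_mem, has]
        rw [if_neg (fun h => has (by simpa [PySem.Set.contains, List.contains_iff_mem] using h)), ih]
        simp only [PySem.Set.mem_add, List.count_cons_self, List.mem_cons, has, false_and,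
          false_or, or_true, true_and]
        constructor
        · rintro (h | h | h)
          · exact Or.inl h
          · exact Or.inr (by have := h2 h; omega)
          · exact Or.inr (by omega)
        · rintro (h | h)
          · tauto
          · by_cases hat : a ∈ t
            · tauto
            · exfalso; have : t.count a = 0 := by simpa [List.count_eq_zero] using hat
              omega
    · have hcnt : List.count a (x :: t) = t.count a := by
        simp [List.count_cons, if_neg (fun h : x = a => hax h.symm)]
      have hmem : a ∈ x :: t ↔ a ∈ t := by simp [List.mem_cons, hax]
      by_cases hxs : s.contains x
      · rw [if_pos hxs, ih]
        simp [PySem.Set.mem_add, hax, hcnt, hmem]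
      · rw [if_neg hxs, ih]
        have : a ∈ PySem.Set.add s x ↔ a ∈ s := by simp [PySem.Set.mem_add, hax]
        simp [this, hcnt, hmem]

-- A's inner loop: what owners[a] becomes after one station's aliases are processed.
lemma owners_inner (als : List String) (st : String) (d : PySem.Dict String (PySem.Set String))
    (a : String) :
    (als.foldl (fun d x => d.modify x [] (fun s => PySem.Set.add s st)) d).getD a [] =
      if a ∈ als then PySem.Set.add (d.getD a []) st else d.getD a [] := by
  induction als generalizing d with
  | nil => simp
  | cons x t ih =>
    simp only [List.foldl_cons, ih, List.mem_cons]
    by_cases hax : a = x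
    · subst hax
      rw [PySem.Dict.getD_modify_self]
      by_cases hat : a ∈ t
      · simp only [hat, or_true, if_pos]
        have : PySem.Set.add (PySem.Set.add (d.getD a []) st) st = PySem.Set.add (d.getD a []) st := by
          by_cases h : st ∈ d.getD a []
          · simp [PySem.Set.add, List.contains_iff_mem, h]
          · simp [PySem.Set.add, List.contains_iff_mem, h]
        simp [this]
      · simp [hat]
    · rw [PySem.Dict.getD_modify_of_ne _ _ _ hax]
      simp [ih, hax]

lemma owners_getD_aux (l : List (String × List String)) (d : PySem.Dict String (PySem.Set String))
    (a : String) :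
    (l.foldl (fun owners p =>
        p.2.foldl (fun owners al => owners.modify al [] (fun s => PySem.Set.add s p.1)) owners) d).getD a [] =
      ((l.filter (fun p => p.2.contains a)).map (·.1)).foldl PySem.Set.add (d.getD a []) := by
  induction l generalizing d with
  | nil => simp
  | cons p t ih =>
    simp only [List.foldl_cons, ih, owners_inner, List.filter_cons]
    by_cases h : a ∈ p.2
    · have hc : p.2.contains a = true := List.contains_iff_mem.mpr h
      simp [hc, h]
    · have hc : p.2.contains a = false := by
        simpa [List.contains_iff_mem] using h
      simp [hc, h]

-- owners[a] is exactly the (distinct) stations whose alias set contains a.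
lemma owners_getD (l : List (String × List String)) (a : String) :
    (pvOwners l).getD a [] =
      PySem.Set.ofList ((l.filter (fun p => p.2.contains a)).map (·.1)) := by
  rw [pvOwners, owners_getD_aux, PySem.Set.ofList_eq_foldl, PySem.Dict.getD_empty]

lemma owners_keys_nodup (l : List (String × List String)) : (pvOwners l).keys.Nodup := by
  rw [pvOwners]
  generalize hd : (PySem.Dict.empty : PySem.Dict String (PySem.Set String)) = d
  have hnd : d.keys.Nodup := by rw [← hd]; simp [PySem.Dict.empty, PySem.Dict.keys]
  clear hd
  induction l generalizing d with
  | nil => exact hnd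
  | cons p t ih =>
    simp only [List.foldl_cons]
    exact ih _ (PySem.Dict.nodup_keys_foldl_modify_key p.2 (fun x => x) []
      (fun d x => (fun s => PySem.Set.add s p.1)) d hnd)

lemma count_flatMap_eq_countP (l : List (String × List String)) (a : String)
    (h : ∀ p ∈ l, p.2.Nodup) :
    (l.flatMap (·.2)).count a = l.countP (fun p => p.2.contains a) := by
  induction l with
  | nil => simp
  | cons p t ih =>
    simp only [List.flatMap_cons, List.count_append, List.countP_cons]
    rw [ih (fun q hq => h q (List.mem_cons_of_mem _ hq))]
    have hcp : List.count a p.2 = if a ∈ p.2 then 1 else 0 :=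
      List.count_eq_of_nodup (h p (List.mem_cons_self ..))
    by_cases hm : a ∈ p.2
    · have : p.2.contains a = true := List.contains_iff_mem.mpr hm
      simp [hcp, hm, this, Nat.add_comm]
    · have : p.2.contains a = false := by simpa [List.contains_iff_mem] using hm
      simp [hcp, hm, this]

-- the two conflict sets have the same members: both mean "a belongs to ≥ 2 station entries"
lemma conflicts_mem_iff (l : List (String × List String))
    (hk : (l.map Prod.fst).Nodup) (hn : ∀ p ∈ l, p.2.Nodup) (a : String) :
    a ∈ PySem.Set.ofList (((pvOwners l).items.filter (fun q => decide (1 < q.2.length))).map (·.1)) ↔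
      a ∈ (l.foldl (fun sc p => p.2.foldl pvScanStep sc) (PySem.Set.empty, PySem.Set.empty)).2 := by
  have hflt : ((l.filter (fun p => p.2.contains a)).map (·.1)).Nodup :=
    ((List.filter_sublist).map Prod.fst).nodup hk
  have hlen : ((pvOwners l).getD a []).length = l.countP (fun p => p.2.contains a) := by
    rw [owners_getD, PySem.Set.ofList_eq_self_of_nodup _ hflt, List.length_map,
      ← List.countP_eq_length_filter]
  have hL : a ∈ PySem.Set.ofList (((pvOwners l).items.filter (fun q => decide (1 < q.2.length))).map (·.1)) ↔
      1 < l.countP (fun p => p.2.contains a) := by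
    rw [PySem.Set.mem_ofList]
    constructor
    · rintro h
      obtain ⟨q, hq, rfl⟩ := List.mem_map.mp h
      obtain ⟨hqi, hql⟩ := List.mem_filter.mp hq
      have := (PySem.Dict.get?_eq_some_iff_mem_items _ _ _ (owners_keys_nodup l)).mpr hqi
      have hgd : (pvOwners l).getD q.1 [] = q.2 := by
        rw [PySem.Dict.getD_eq_get?_getD, this, Option.getD_some]
      rw [← hlen] at *
      rw [hgd]
      simpa using hql
    · intro h
      rw [← hlen] at h
      have hgd := PySem.Dict.getD_eq_get?_getD (pvOwners l) a ([] : PySem.Set String)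
      cases hg : (pvOwners l).get? a with
      | none => rw [hg] at hgd; simp at hgd; rw [hgd] at h; simp at h
      | some v =>
        rw [hg] at hgd; simp at hgd
        refine List.mem_map.mpr ⟨(a, v), List.mem_filter.mpr ⟨?_, ?_⟩, rfl⟩
        · exact (PySem.Dict.get?_eq_some_iff_mem_items _ _ _ (owners_keys_nodup l)).mp hg
        · rw [hgd] at h; simpa using h
  have hR : a ∈ (l.foldl (fun sc p => p.2.foldl pvScanStep sc) (PySem.Set.empty, PySem.Set.empty)).2 ↔
      1 < l.countP (fun p => p.2.contains a) := by
    have : l.foldl (fun sc p => p.2.foldl pvScanStep sc) (PySem.Set.empty, PySem.Set.empty) =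
        (l.flatMap (·.2)).foldl pvScanStep (PySem.Set.empty, PySem.Set.empty) :=
      (List.foldl_flatMap).symm
    rw [this, scan_snd_mem, count_flatMap_eq_countP l a hn]
    simp [PySem.Set.empty]
    omega
  rw [hL, hR]

theorem equal_of_pre (l : List (String × List String))
    (hk : (l.map Prod.fst).Nodup) (hn : ∀ p ∈ l, p.2.Nodup) :
    sanitize_alias_conflicts l = sanitize_alias_conflicts_alt l := by
  rw [sanitize_alias_conflicts, sanitize_alias_conflicts_alt]
  set cA := PySem.Set.ofList (((pvOwners l).items.filter (fun q => decide (1 < q.2.length))).map (·.1)) with hcA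
  set cB := (l.foldl (fun sc p => p.2.foldl pvScanStep sc) (PySem.Set.empty, PySem.Set.empty)).2 with hcB
  have hmem : ∀ a, a ∈ cA ↔ a ∈ cB := fun a => conflicts_mem_iff l hk hn a
  have hcont : ∀ a, cA.contains a = cB.contains a := by
    intro a
    by_cases h : a ∈ cA
    · have e1 : cA.contains a = true := by
        simpa [PySem.Set.contains, List.contains_iff_mem] using h
      have e2 : cB.contains a = true := by
        simpa [PySem.Set.contains, List.contains_iff_mem] using (hmem a).mp h
      rw [e1, e2]
    · have h' : a ∉ cB := fun hb => h ((hmem a).mpr hb)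
      have e1 : cA.contains a = false := by
        simpa [PySem.Set.contains, List.contains_iff_mem] using h
      have e2 : cB.contains a = false := by
        simpa [PySem.Set.contains, List.contains_iff_mem] using h'
      rw [e1, e2]
  have hempty : cA.isEmpty = cB.isEmpty := by
    by_cases h : cA.isEmpty
    · rw [h]
      have : cA = [] := List.isEmpty_iff.mp h
      have hB : cB = [] := List.eq_nil_iff_forall_not_mem.mpr
        (fun a hb => (List.eq_nil_iff_forall_not_mem.mp this a) ((hmem a).mpr hb))
      rw [hB]
      rfl
    · have hA : cA ≠ [] := fun e => h (List.isEmpty_iff.mpr e)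
      obtain ⟨a, ha⟩ := List.exists_mem_of_ne_nil _ hA
      have hb : a ∈ cB := (hmem a).mp ha
      have hB : cB ≠ [] := fun e => by simp [e] at hb
      have eA : cA.isEmpty = false := by simpa [List.isEmpty_iff] using hA
      have eB : cB.isEmpty = false := by simpa [List.isEmpty_iff] using hB
      rw [eA, eB]
  rw [← hempty]
  by_cases h : cA.isEmpty
  · rw [if_pos h, if_pos h]
  · rw [if_neg h, if_neg h]
    rw [PySem.Dict.items_foldl_insert_fresh l Prod.fst
      (fun p => PySem.Set.ofList (p.2.filter (fun a => !cA.contains a))) PySem.Dict.empty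
      (fun p _ => PySem.Dict.contains_empty p.1) hk]
    have hitems : (PySem.Dict.empty : PySem.Dict String (PySem.Set String)).items = [] := rfl
    rw [hitems, List.nil_append]
    refine List.map_congr_left (fun p hp => ?_)
    have hnd : (p.2.filter (fun a => !cA.contains a)).Nodup := (hn p hp).filter _
    rw [PySem.Set.ofList_eq_self_of_nodup _ hnd]
    have : PySem.Set.diff p.2 cB = p.2.filter (fun x => !cB.contains x) := rfl
    rw [this]
    congr 1
    exact List.filter_congr (fun a _ => by rw [hcont a])

-- ===== VERDICT (by name: the statement is the Claim_ definition above) =====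
theorem sanitize_alias_conflicts_spec : Claim_equal_sanitize_alias_conflicts := by
  intro l _ hpre
  unfold Spec_sanitize_alias_conflicts
  exact equal_of_pre l hpre.1 hpre.2
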